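-- pv_equiv track=rewrite | github.com/Grottersha123/Code_wars | Char Code Calculation.py | calc
-- ===== SOURCE A (Python) =====
-- def calc(x):
--     # your code here
--     t = ''
--     t1 = ''
--     for i in x:
--         t+= str(ord(i)).replace('7','1')
--     for i in x:
--         t1+= str(ord(i))
--     return abs(sum(list(map(int,list(t))))-sum(list(map(int,list(t1)))))
-- ===== SOURCE B (Python) =====
-- def calc(x):
--     # |digit-sum(ords with 7->1) - digit-sum(ords)| = 6 * (number of '7' digits),
--     # since replacing a digit 7 by 1 lowers the digit sum by exactly 6.
--     return 6 * sum(str(ord(c)).count('7') for c in x)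
-- ===== Notes on version B (the rewrite author's own statement) =====
-- stated objective: faster
-- what changed: Instead of building two concatenated digit strings and subtracting their digit sums, B uses the identity that replacing a digit seven by one lowers the digit sum by exactly six, so it makes one pass counting seven-digits in each ord() string and returns six times the count.
import Mathlib
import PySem

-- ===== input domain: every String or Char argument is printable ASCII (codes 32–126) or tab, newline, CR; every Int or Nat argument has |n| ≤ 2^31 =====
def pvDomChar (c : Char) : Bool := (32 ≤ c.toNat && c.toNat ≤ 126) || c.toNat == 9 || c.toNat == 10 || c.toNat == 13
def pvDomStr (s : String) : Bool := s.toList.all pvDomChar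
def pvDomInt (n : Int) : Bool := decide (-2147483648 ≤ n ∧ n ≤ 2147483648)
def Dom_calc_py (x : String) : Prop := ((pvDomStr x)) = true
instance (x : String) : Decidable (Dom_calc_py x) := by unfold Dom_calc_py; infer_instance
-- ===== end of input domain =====

-- B replaces A's two concatenated digit-strings and digit-sum subtraction by one pass that
-- counts the digit sevens per character (each replacement lowers the digit sum by exactly 6): fewer passes, no intermediate strings.

-- ===== PORT A =====
-- Python's int(ch) applied to each one-character string of map(int, list(t));
-- exact wherever int() succeeds (it always does here: t holds decimal digits only).
def pyIntChar (c : Char) : Int := (PySem.Int.ofChars? [c]).getD 0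

def calc_py (x : String) : Int :=
  let t := x.toList.foldl
    (fun acc i => acc ++ PySem.Chars.replace (PySem.Int.toChars ((i.toNat : Int))) ['7'] ['1']) []
  let t1 := x.toList.foldl
    (fun acc i => acc ++ PySem.Int.toChars ((i.toNat : Int))) []
  |(t.map pyIntChar).sum - (t1.map pyIntChar).sum|

-- ===== PORT B =====
def calc_py_alt (x : String) : Int :=
  6 * (x.toList.map
        (fun c => (PySem.Chars.count (PySem.Int.toChars ((c.toNat : Int))) ['7'] : Int))).sum

-- ===== PRECONDITION & SPEC =====
def Spec_calc_py (x : String) (out : Int) : Prop := out = calc_py_alt x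
instance (x : String) (out : Int) : Decidable (Spec_calc_py x out) := by unfold Spec_calc_py; infer_instance

-- ===== CLAIM (what is proved, stated in full; the proofs are below) =====
def Claim_equal_calc_py : Prop := ∀ (x : String), Dom_calc_py x → Spec_calc_py x (calc_py x)

-- ===== LEMMAS AND PROOFS =====

-- per-character fact, decided over all ASCII codes: replacing 7→1 in str(n) lowers the digit
-- sum by 6 per '7' digit
theorem pv_key : ∀ n : Nat, n < 127 →
    ((PySem.Int.toChars ((n : Int))).map pyIntChar).sum
      - ((PySem.Chars.replace (PySem.Int.toChars ((n : Int))) ['7'] ['1']).map pyIntChar).sum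
      = 6 * (PySem.Chars.count (PySem.Int.toChars ((n : Int))) ['7'] : Int) := by decide

theorem pv_list (l : List Char) (h : ∀ c ∈ l, c.toNat < 127) :
    ((l.flatMap (fun i => PySem.Int.toChars ((i.toNat : Int)))).map pyIntChar).sum
      - ((l.flatMap (fun i =>
            PySem.Chars.replace (PySem.Int.toChars ((i.toNat : Int))) ['7'] ['1'])).map pyIntChar).sum
      = 6 * (l.map
          (fun c => (PySem.Chars.count (PySem.Int.toChars ((c.toNat : Int))) ['7'] : Int))).sum := by
  induction l with
  | nil => simp
  | cons c l ih =>
    have hc := pv_key c.toNat (h c (by simp))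
    have hl := ih (fun d hd => h d (by simp [hd]))
    simp only [List.flatMap_cons, List.map_append, List.sum_append, List.map_cons, List.sum_cons]
    linarith

theorem pv_count_nonneg (l : List Char) :
    0 ≤ (l.map
      (fun c => (PySem.Chars.count (PySem.Int.toChars ((c.toNat : Int))) ['7'] : Int))).sum := by
  apply List.sum_nonneg
  intro x hx
  obtain ⟨c, -, rfl⟩ := List.mem_map.mp hx
  exact Int.natCast_nonneg _

-- ===== VERDICT (by name: the statement is the Claim_ definition above) =====
theorem calc_py_spec : Claim_equal_calc_py := by
  intro x hdom
  unfold Spec_calc_py calc_py calc_py_alt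
  simp only [PySem.List.foldl_append_eq_flatMap, List.nil_append]
  have h : ∀ c ∈ x.toList, c.toNat < 127 := by
    intro c hc
    have := List.all_eq_true.mp hdom c hc
    simp only [pvDomChar, Bool.or_eq_true, Bool.and_eq_true, decide_eq_true_eq, beq_iff_eq] at this
    omega
  have nn := pv_count_nonneg x.toList
  rw [abs_sub_comm, pv_list x.toList h, abs_of_nonneg (by linarith)]
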